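-- pv_equiv track=rewrite | github.com/banteg/crimson | scripts/atlas_scan.py | extract_call_args
-- ===== SOURCE A (Python) =====
-- def split_args(raw: str) -> list[str]:
--     args: list[str] = []
--     current: list[str] = []
--     depth = 0
--     for ch in raw:
--         if ch == "(":
--             depth += 1
--         elif ch == ")":
--             if depth > 0:
--                 depth -= 1
--         if ch == "," and depth == 0:
--             args.append("".join(current).strip())
--             current = []
--             continue
--         current.append(ch)
--     tail = "".join(current).strip()
--     if tail:
--         args.append(tail)
--     return args
--
-- def extract_call_args(line: str, marker: str) -> list[str] | None:
--     idx = line.find(marker)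
--     if idx == -1:
--         return None
--     start = idx + len(marker)
--     depth = 0
--     end = None
--     for i in range(start, len(line)):
--         ch = line[i]
--         if ch == "(":
--             depth += 1
--         elif ch == ")":
--             if depth == 0:
--                 end = i
--                 break
--             depth -= 1
--     if end is None:
--         return None
--     return split_args(line[start:end])
-- ===== SOURCE B (Python) =====
-- def extract_call_args(line: str, marker: str) -> list[str] | None:
--     idx = line.find(marker)
--     if idx == -1:
--         return None
--     args: list[str] = []
--     buf: list[str] = []
--     depth = 0
--     for ch in line[idx + len(marker):]:
--         if ch == "(":
--             depth += 1
--             buf.append(ch)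
--         elif ch == ")":
--             if depth == 0:
--                 tail = "".join(buf).strip()
--                 if tail:
--                     args.append(tail)
--                 return args
--             depth -= 1
--             buf.append(ch)
--         elif ch == "," and depth == 0:
--             args.append("".join(buf).strip())
--             buf = []
--         else:
--             buf.append(ch)
--     return None
-- ===== Notes on version B (the rewrite author's own statement) =====
-- stated objective: simpler
-- what changed: Replaced A's two-phase design (an index loop that locates the closing paren, then a second depth-tracking pass over the slice in split_args) by one single pass past the marker that maintains depth, a current-argument buffer and the result list, emitting arguments as it goes and returning at the depth-0 closing paren.
import Mathlib
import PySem

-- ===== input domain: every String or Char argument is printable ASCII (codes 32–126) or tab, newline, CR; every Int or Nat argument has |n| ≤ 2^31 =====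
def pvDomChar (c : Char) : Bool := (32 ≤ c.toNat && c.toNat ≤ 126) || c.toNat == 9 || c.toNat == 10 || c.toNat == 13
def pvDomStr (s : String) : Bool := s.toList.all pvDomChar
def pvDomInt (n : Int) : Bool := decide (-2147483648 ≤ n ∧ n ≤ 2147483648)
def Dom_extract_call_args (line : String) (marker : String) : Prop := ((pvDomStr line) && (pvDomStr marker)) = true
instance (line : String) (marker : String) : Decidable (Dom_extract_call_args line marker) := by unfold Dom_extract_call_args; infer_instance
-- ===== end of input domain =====

-- B replaces A's two-phase design (locate the closing paren by index, then re-scan the slice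
-- in split_args) by one single depth-tracking pass that emits arguments as it goes (objective: simpler).

-- ===== PORT A =====
-- the index loop of extract_call_args: first ')' at depth 0, walking chars in step with index i
def pvFindEnd (cs : List Char) (i : Int) (depth : Int) : Option Int :=
  match cs with
  | [] => none
  | ch :: rest =>
    if ch = '(' then pvFindEnd rest (i + 1) (depth + 1)
    else if ch = ')' then
      if depth = 0 then some i else pvFindEnd rest (i + 1) (depth - 1)
    else pvFindEnd rest (i + 1) depth

-- split_args: loop state (args, current, depth); tail handling at the end
def pvSplitArgs (cs : List Char) (args : List String) (current : List Char) (depth : Int) : List String :=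
  match cs with
  | [] =>
    let tail := PySem.Chars.strip current
    if tail = [] then args else args ++ [String.ofList tail]
  | ch :: rest =>
    let d := if ch = '(' then depth + 1
             else if ch = ')' then (if depth > 0 then depth - 1 else depth)
             else depth
    if ch = ',' ∧ d = 0 then pvSplitArgs rest (args ++ [String.ofList (PySem.Chars.strip current)]) [] d
    else pvSplitArgs rest args (current ++ [ch]) d

def extract_call_args (line : String) (marker : String) : Option (List String) :=
  let idx := PySem.Str.find line marker
  if idx = -1 then none
  else
    let start := idx + PySem.Str.len marker
    match pvFindEnd (PySem.List.slice line.toList (some start) none) start 0 with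
    | none => none
    | some e => some (pvSplitArgs (PySem.List.slice line.toList (some start) (some e)) [] [] 0)

-- ===== PORT B =====
-- single pass: depth, current-argument buffer, results; returns at the depth-0 ')'
def pvScan (cs : List Char) (depth : Int) (buf : List Char) (args : List String) : Option (List String) :=
  match cs with
  | [] => none
  | ch :: rest =>
    if ch = '(' then pvScan rest (depth + 1) (buf ++ [ch]) args
    else if ch = ')' then
      if depth = 0 then
        let tail := PySem.Chars.strip buf
        some (if tail = [] then args else args ++ [String.ofList tail])
      else pvScan rest (depth - 1) (buf ++ [ch]) args
    else if ch = ',' ∧ depth = 0 then pvScan rest depth [] (args ++ [String.ofList (PySem.Chars.strip buf)])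
    else pvScan rest depth (buf ++ [ch]) args

def extract_call_args_alt (line : String) (marker : String) : Option (List String) :=
  let idx := PySem.Str.find line marker
  if idx = -1 then none
  else pvScan (PySem.List.slice line.toList (some (idx + PySem.Str.len marker)) none) 0 [] []

-- ===== PRECONDITION & SPEC =====
def Spec_extract_call_args (line : String) (marker : String) (out : Option (List String)) : Prop := out = extract_call_args_alt line marker
instance (line : String) (marker : String) (out : Option (List String)) : Decidable (Spec_extract_call_args line marker out) := by unfold Spec_extract_call_args; infer_instance

-- ===== CLAIM (what is proved, stated in full; the proofs are below) =====
def Claim_equal_extract_call_args : Prop := ∀ (line : String) (marker : String), Dom_extract_call_args line marker → Spec_extract_call_args line marker (extract_call_args line marker)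

-- ===== LEMMAS AND PROOFS =====

theorem pvFindEnd_le (cs : List Char) (i depth e : Int) (h : pvFindEnd cs i depth = some e) : i ≤ e := by
  induction cs generalizing i depth with
  | nil => simp [pvFindEnd] at h
  | cons ch rest ih =>
    simp only [pvFindEnd] at h
    split_ifs at h with h1 h2 h3
    · have := ih _ _ h; omega
    · simp at h; omega
    · have := ih _ _ h; omega
    · have := ih _ _ h; omega

-- main invariant: B's single pass equals A's find-then-split on any suffix
theorem pvScan_eq (cs : List Char) (i depth : Int) (cur : List Char) (acc : List String)
    (hd : 0 ≤ depth) :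
    pvScan cs depth cur acc =
      match pvFindEnd cs i depth with
      | none => none
      | some e => some (pvSplitArgs (cs.take (e - i).toNat) acc cur depth) := by
  induction cs generalizing i depth cur acc with
  | nil => simp [pvScan, pvFindEnd]
  | cons ch rest ih =>
    by_cases h1 : ch = '('
    · subst h1
      simp only [pvScan, pvFindEnd, reduceIte]
      rw [ih (i + 1) (depth + 1) (cur ++ ['(']) acc (by omega)]
      cases heq : pvFindEnd rest (i + 1) (depth + 1) with
      | none => rfl
      | some e =>
        have hle := pvFindEnd_le rest (i + 1) (depth + 1) e heq
        show some _ = some _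
        congr 1
        rw [show (e - (i + 1)).toNat = (e - i - 1).toNat from by omega,
            show (e - i).toNat = (e - i - 1).toNat + 1 from by omega, List.take_succ_cons]
        simp [pvSplitArgs]
    · by_cases h2 : ch = ')'
      · subst h2
        by_cases h3 : depth = 0
        · subst h3
          simp [pvScan, pvFindEnd, pvSplitArgs]
        · simp only [pvScan, pvFindEnd, if_neg h1, reduceIte, if_neg h3]
          rw [ih (i + 1) (depth - 1) (cur ++ [')']) acc (by omega)]
          cases heq : pvFindEnd rest (i + 1) (depth - 1) with
          | none => rfl
          | some e =>
            have hle := pvFindEnd_le rest (i + 1) (depth - 1) e heq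
            show some _ = some _
            congr 1
            rw [show (e - (i + 1)).toNat = (e - i - 1).toNat from by omega,
                show (e - i).toNat = (e - i - 1).toNat + 1 from by omega, List.take_succ_cons]
            have hgt : depth > 0 := by omega
            simp [pvSplitArgs, hgt]
      · by_cases h4 : ch = ',' ∧ depth = 0
        · obtain ⟨hc, hz⟩ := h4
          subst hc hz
          simp only [pvScan, pvFindEnd, if_neg h1, if_neg h2, and_self, reduceIte]
          rw [ih (i + 1) 0 [] (acc ++ [String.ofList (PySem.Chars.strip cur)]) le_rfl]
          cases heq : pvFindEnd rest (i + 1) 0 with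
          | none => rfl
          | some e =>
            have hle := pvFindEnd_le rest (i + 1) 0 e heq
            show some _ = some _
            congr 1
            rw [show (e - (i + 1)).toNat = (e - i - 1).toNat from by omega,
                show (e - i).toNat = (e - i - 1).toNat + 1 from by omega, List.take_succ_cons]
            simp [pvSplitArgs, h1, h2]
        · simp only [pvScan, pvFindEnd, if_neg h1, if_neg h2, if_neg h4]
          rw [ih (i + 1) depth (cur ++ [ch]) acc hd]
          cases heq : pvFindEnd rest (i + 1) depth with
          | none => rfl
          | some e =>
            have hle := pvFindEnd_le rest (i + 1) depth e heq
            show some _ = some _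
            congr 1
            rw [show (e - (i + 1)).toNat = (e - i - 1).toNat from by omega,
                show (e - i).toNat = (e - i - 1).toNat + 1 from by omega, List.take_succ_cons]
            simp [pvSplitArgs, h1, h2, h4]

-- ===== VERDICT (by name: the statement is the Claim_ definition above) =====
theorem extract_call_args_spec : Claim_equal_extract_call_args := by
  intro line marker _
  unfold Spec_extract_call_args extract_call_args extract_call_args_alt
  simp only [PySem.Str.find_eq, PySem.Str.len_eq]
  by_cases h : PySem.Chars.find line.toList marker.toList = -1
  · simp [h]
  · simp only [if_neg h]
    have h0 : (0:Int) ≤ PySem.Chars.find line.toList marker.toList := by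
      have := PySem.Chars.neg_one_le_find line.toList marker.toList
      omega
    have hs : (0:Int) ≤ PySem.Chars.find line.toList marker.toList + (marker.toList.length : Int) := by
      omega
    rw [pvScan_eq _ (PySem.Chars.find line.toList marker.toList + (marker.toList.length : Int)) 0 [] [] le_rfl]
    cases heq : pvFindEnd
        (PySem.List.slice line.toList (some (PySem.Chars.find line.toList marker.toList + (marker.toList.length : Int))) none)
        (PySem.Chars.find line.toList marker.toList + (marker.toList.length : Int)) 0 with
    | none => rfl
    | some e =>
      have hle := pvFindEnd_le _ _ _ _ heq
      have hk : PySem.List.slice line.toList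
            (some (PySem.Chars.find line.toList marker.toList + (marker.toList.length : Int))) (some e)
          = List.take (e - (PySem.Chars.find line.toList marker.toList + (marker.toList.length : Int))).toNat
              (PySem.List.slice line.toList
                (some (PySem.Chars.find line.toList marker.toList + (marker.toList.length : Int))) none) := by
        rw [PySem.List.slice_toNat line.toList hs (by omega), PySem.List.slice_from line.toList hs]
        congr 1
        omega
      show some _ = some _
      congr 1
      rw [hk]
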